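-- pv_equiv track=rewrite | github.com/apriljgranzow/advent-of-code-2017 | 6/solution.py | part_two
-- ===== SOURCE A (Python) =====
-- from operator import itemgetter
--
-- def redistribute(intList):
--     new_list = intList[:]
--     indices_and_values = enumerate(intList)
--     max_index, max_value = max(indices_and_values,key=itemgetter(1))
--     d,r = divmod(max_value,len(intList)-1)
--     if d == 0:
--         for i in range(max_index+1,max_index+max_value+1):
--             new_list[i%len(new_list)] += 1
--         new_list[max_index] = 0
--     else:
--         for i in range(len(new_list)):
--             if i != max_index:
--                 new_list[i] += d
--             else:
--                 new_list[i] = r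
--     return new_list
--
-- def part_two(intList):
--     new_list = intList[:]
--     configurations = set() # can't hash lists so we will cast to string
--     loops = 0
--     repeated_configuration = None
--     while True:
--         loops += 1
--         new_list = redistribute(new_list)
--         if str(new_list) == repeated_configuration:
--             return loops
--         elif str(new_list) in configurations:
--             repeated_configuration = str(new_list)
--             loops = 0
--             configurations = set()
--         else:
--             configurations.add(str(new_list))
-- ===== SOURCE B (Python) =====
-- def redistribute(intList):
--     new_list = intList[:]
--     max_index, max_value = max(enumerate(intList), key=lambda p: p[1])
--     d, r = divmod(max_value, len(intList) - 1)
--     if d == 0: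
--         for i in range(max_index + 1, max_index + max_value + 1):
--             new_list[i % len(new_list)] += 1
--         new_list[max_index] = 0
--     else:
--         for i in range(len(new_list)):
--             if i != max_index:
--                 new_list[i] += d
--             else:
--                 new_list[i] = r
--     return new_list
--
-- def part_two(intList):
--     state = redistribute(intList)
--     seen = {str(state): 1}
--     step = 1
--     while True:
--         step += 1
--         state = redistribute(state)
--         key = str(state)
--         if key in seen:
--             return step - seen[key]
--         seen[key] = step
-- ===== Notes on version B (the rewrite author's own statement) =====
-- stated objective: alternative
-- what changed: part_two finds the cycle in a single pass, keeping a dict that maps each configuration string to the step of its first occurrence and returning current step minus stored step at the first repeat, instead of A's two-phase scheme (detect a repeat with a set, then reset the counter and the set and loop again until the repeated configuration recurs); intended as faster (it does roughly half the redistributions), measured only ~1.5x.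
-- outside the precondition, e.g. on part_two([]): A raises ValueError, B raises ValueError; on part_two([5]): A raises ZeroDivisionError, B raises ZeroDivisionError
import Mathlib
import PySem

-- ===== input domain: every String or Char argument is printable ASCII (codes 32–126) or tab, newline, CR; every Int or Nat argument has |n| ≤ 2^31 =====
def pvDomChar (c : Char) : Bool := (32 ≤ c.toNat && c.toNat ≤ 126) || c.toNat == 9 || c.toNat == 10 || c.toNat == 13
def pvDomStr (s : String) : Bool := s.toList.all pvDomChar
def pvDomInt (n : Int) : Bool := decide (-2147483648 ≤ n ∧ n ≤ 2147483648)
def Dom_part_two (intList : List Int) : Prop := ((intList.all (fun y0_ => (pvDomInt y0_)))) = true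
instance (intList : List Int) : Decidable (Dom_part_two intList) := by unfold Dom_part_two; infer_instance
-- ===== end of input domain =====

-- B rewrites part_two as a single pass with a first-seen dict (answer = step − first-seen step),
-- replacing A's two-phase find-repeat-then-reset-and-recount loop (same cost up to a constant).

-- ===== PORT A =====
-- shared helper of the module (both Pythons use it unchanged): str(list_of_ints), e.g. "[1, -2]"
def pyStrList (l : List Int) : String :=
  "[" ++ PySem.Str.join ", " (l.map PySem.Int.toStr) ++ "]"

-- shared helper `redistribute`, transliterated line by line
def redistribute (intList : List Int) : List Int :=
  let new_list := intList   -- new_list = intList[:]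
  match PySem.List.max? (PySem.List.enumerate intList) (fun p => p.2) with
  | none => new_list        -- unreachable under Pre_: Python raises ValueError (max of empty)
  | some (max_index, max_value) =>
    match PySem.Int.divmod? max_value ((intList.length : Int) - 1) with
    | none => new_list      -- unreachable under Pre_: ZeroDivisionError when len(intList) = 1
    | some (d, r) =>
      if d = 0 then
        let nl := (PySem.List.pyRange (max_index + 1) (max_index + max_value + 1) 1).foldl
          (fun nl i =>
            PySem.List.pySetD nl (PySem.Int.mod i (nl.length : Int))
              (PySem.List.pyGetD nl (PySem.Int.mod i (nl.length : Int)) 0 + 1)) new_list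
        PySem.List.pySetD nl max_index 0
      else
        (PySem.List.pyRange 0 (new_list.length : Int) 1).foldl
          (fun nl i =>
            if i ≠ max_index then
              PySem.List.pySetD nl i (PySem.List.pyGetD nl i 0 + d)
            else
              PySem.List.pySetD nl i r) new_list

-- termination fuel for the two `while True:` loops (a totality guard only; under Pre_ the
-- proofs show both loops return strictly before the fuel runs out)
def pvFuel (xs : List Int) : Nat :=
  let u := redistribute xs
  let lo := min 0 (u.foldr min 0)
  let hi := u.sum - ((xs.length : Int) - 1) * lo
  2 * (hi + 1 - lo).toNat ^ xs.length + 4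

-- A's while-loop: state (new_list, configurations, loops, repeated_configuration)
def partTwoLoopA : Nat → List Int → PySem.Set String → Int → Option String → Int
  | 0, _, _, _, _ => 0    -- fuel exhausted (never reached under Pre_)
  | fuel + 1, cur, configurations, loops, repeated_configuration =>
    let loops1 := loops + 1
    let new_list := redistribute cur
    if some (pyStrList new_list) = repeated_configuration then loops1
    else if PySem.Set.contains configurations (pyStrList new_list) then
      partTwoLoopA fuel new_list PySem.Set.empty 0 (some (pyStrList new_list))
    else
      partTwoLoopA fuel new_list (PySem.Set.add configurations (pyStrList new_list)) loops1
        repeated_configuration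

def part_two (intList : List Int) : Int :=
  partTwoLoopA (pvFuel intList) intList PySem.Set.empty 0 none

-- ===== PORT B =====
-- B's single-pass while-loop: state (state, seen : dict str -> first step, step)
def partTwoLoopB : Nat → List Int → PySem.Dict String Int → Int → Int
  | 0, _, _, _ => 0       -- fuel exhausted (never reached under Pre_)
  | fuel + 1, state, seen, step =>
    let step1 := step + 1
    let nl := redistribute state
    match PySem.Dict.get? seen (pyStrList nl) with
    | some first => step1 - first
    | none => partTwoLoopB fuel nl (PySem.Dict.insert seen (pyStrList nl) step1) step1

def part_two_alt (intList : List Int) : Int :=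
  let state := redistribute intList
  partTwoLoopB (pvFuel intList) state
    (PySem.Dict.insert PySem.Dict.empty (pyStrList state) 1) 1

-- ===== PRECONDITION & SPEC =====
-- Pre_ excludes exactly the inputs on which A raises: [] (ValueError from max of an empty
-- sequence) and single-element lists (ZeroDivisionError from divmod(_, len-1)).
def Pre_part_two (intList : List Int) : Prop := 2 ≤ intList.length
instance (intList : List Int) : Decidable (Pre_part_two intList) := by
  unfold Pre_part_two; infer_instance

def pvWitness_part_two : List Int := [0, 2, 7]

def Spec_part_two (intList : List Int) (out : Int) : Prop := out = part_two_alt intList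
instance (intList : List Int) (out : Int) : Decidable (Spec_part_two intList out) := by
  unfold Spec_part_two; infer_instance

-- ===== CLAIM (what is proved, stated in full; the proofs are below) =====
def Claim_equal_part_two : Prop :=
  ∀ (intList : List Int), Dom_part_two intList → Pre_part_two intList →
    Spec_part_two intList (part_two intList)

-- ===== LEMMAS AND PROOFS =====

-- ---------- 1. str(list_of_ints) is injective ----------

theorem tdc_acc (b f : Nat) : ∀ (n : Nat) (ds : List Char),
    Nat.toDigitsCore b f n ds = Nat.toDigitsCore b f n [] ++ ds := by
  induction f with
  | zero => intro n ds; simp [Nat.toDigitsCore]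
  | succ f ih =>
    intro n ds
    by_cases h : n / b = 0
    · simp [Nat.toDigitsCore, h]
    · simp only [Nat.toDigitsCore, h, if_false]
      rw [ih (n / b) (Nat.digitChar (n % b) :: ds), ih (n / b) [Nat.digitChar (n % b)]]
      simp

theorem tdc_fuel (b : Nat) (hb : 2 ≤ b) : ∀ (n f f' : Nat), n < f → n < f' →
    Nat.toDigitsCore b f n [] = Nat.toDigitsCore b f' n [] := by
  intro n
  induction n using Nat.strong_induction_on with
  | _ n ih =>
    intro f f' hf hf'
    match f, f', hf, hf' with
    | f + 1, f' + 1, hf, hf' =>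
      by_cases h : n / b = 0
      · simp [Nat.toDigitsCore, h]
      · have hn0 : 0 < n := by
          rcases Nat.eq_zero_or_pos n with rfl | hp
          · simp [Nat.zero_div] at h
          · exact hp
        have hdiv : n / b < n := Nat.div_lt_self hn0 (by omega)
        simp only [Nat.toDigitsCore, h, if_false]
        rw [tdc_acc, tdc_acc b f' (n / b)]
        congr 1
        exact ih (n / b) hdiv f f' (lt_of_lt_of_le hdiv (Nat.lt_succ_iff.mp hf)) (lt_of_lt_of_le hdiv (Nat.lt_succ_iff.mp hf'))

theorem digitsOf_small {n : Nat} (h : n < 10) : Nat.toDigits 10 n = [Nat.digitChar n] := by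
  simp [Nat.toDigits, Nat.toDigitsCore, Nat.div_eq_of_lt h, Nat.mod_eq_of_lt h]

theorem digitsOf_large {n : Nat} (h : 10 ≤ n) :
    Nat.toDigits 10 n = Nat.toDigits 10 (n / 10) ++ [Nat.digitChar (n % 10)] := by
  have h0 : n / 10 ≠ 0 := by
    rw [Nat.div_ne_zero_iff]
    omega
  have hdiv : n / 10 < n := Nat.div_lt_self (by omega) (by omega)
  conv_lhs => rw [Nat.toDigits]
  simp only [Nat.toDigitsCore, h0, if_false]
  rw [tdc_acc]
  congr 1
  exact tdc_fuel 10 (by norm_num) (n / 10) n (n / 10 + 1) (by omega) (by omega)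

theorem digitChar_lt10_toNat {m : Nat} (h : m < 10) : (Nat.digitChar m).toNat = m + 48 := by
  interval_cases m <;> decide

theorem digitsOf_digits {n : Nat} : ∀ c ∈ Nat.toDigits 10 n, 48 ≤ c.toNat ∧ c.toNat ≤ 57 := by
  induction n using Nat.strong_induction_on with
  | _ n ih =>
    by_cases h : n < 10
    · rw [digitsOf_small h]
      intro c hc
      simp at hc
      subst hc
      have := digitChar_lt10_toNat h
      omega
    · rw [digitsOf_large (by omega)]
      intro c hc
      rcases List.mem_append.1 hc with hc | hc
      · exact ih (n / 10) (Nat.div_lt_self (by omega) (by omega)) c hc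
      · simp at hc
        subst hc
        have := digitChar_lt10_toNat (Nat.mod_lt n (by omega))
        omega

theorem digitsOf_ne_nil {n : Nat} : Nat.toDigits 10 n ≠ [] := by
  by_cases h : n < 10
  · rw [digitsOf_small h]; simp
  · rw [digitsOf_large (by omega)]; simp

theorem eval_digitsOf (n : Nat) :
    (Nat.toDigits 10 n).foldl (fun a c => 10 * a + (c.toNat - 48)) 0 = n := by
  induction n using Nat.strong_induction_on with
  | _ n ih =>
    by_cases h : n < 10
    · rw [digitsOf_small h]
      simp [digitChar_lt10_toNat h]
    · rw [digitsOf_large (by omega), List.foldl_append]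
      rw [ih (n / 10) (Nat.div_lt_self (by omega) (by omega))]
      simp [digitChar_lt10_toNat (Nat.mod_lt n (by omega))]
      omega

theorem digitsOf_inj {a b : Nat} (h : Nat.toDigits 10 a = Nat.toDigits 10 b) : a = b := by
  have ha := eval_digitsOf a
  rw [h, eval_digitsOf] at ha
  omega

theorem toChars_eq (n : Int) : PySem.Int.toChars n =
    if n < 0 then '-' :: Nat.toDigits 10 n.natAbs else Nat.toDigits 10 n.toNat := rfl

theorem toChars_digits {n : Int} :
    ∀ c ∈ PySem.Int.toChars n, c.toNat = 45 ∨ (48 ≤ c.toNat ∧ c.toNat ≤ 57) := by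
  rw [toChars_eq]
  split_ifs with h
  · intro c hc
    rcases List.mem_cons.1 hc with hc | hc
    · left; rw [hc]; rfl
    · right; exact digitsOf_digits c hc
  · intro c hc; right; exact digitsOf_digits c hc

theorem toChars_ne_nil {n : Int} : PySem.Int.toChars n ≠ [] := by
  rw [toChars_eq]
  split_ifs with h
  · simp
  · exact digitsOf_ne_nil

theorem toChars_inj {a b : Int} (h : PySem.Int.toChars a = PySem.Int.toChars b) : a = b := by
  rw [toChars_eq, toChars_eq] at h
  split_ifs at h with h1 h2 h2
  · rw [List.cons.injEq] at h
    have := digitsOf_inj h.2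
    omega
  · exfalso
    have hm : '-' ∈ Nat.toDigits 10 b.toNat := by rw [← h]; exact List.mem_cons_self
    have := digitsOf_digits '-' hm
    have h45 : ('-' : Char).toNat = 45 := rfl
    omega
  · exfalso
    have hm : '-' ∈ Nat.toDigits 10 a.toNat := by rw [h]; exact List.mem_cons_self
    have := digitsOf_digits '-' hm
    have h45 : ('-' : Char).toNat = 45 := rfl
    omega
  · have := digitsOf_inj h
    omega

theorem pref_lemma : ∀ (a : List Char), ∀ (b r1 r2 : List Char),
    (',' ∉ a) → (',' ∉ b) →
    (r1 = [] ∨ ∃ t, r1 = ',' :: t) → (r2 = [] ∨ ∃ t, r2 = ',' :: t) →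
    a ++ r1 = b ++ r2 → a = b ∧ r1 = r2 := by
  intro a
  induction a with
  | nil =>
    intro b r1 r2 ha hb h1 h2 heq
    cases b with
    | nil => exact ⟨rfl, heq⟩
    | cons c bt =>
      exfalso
      rcases h1 with rfl | ⟨t, rfl⟩
      · simp at heq
      · simp only [List.nil_append, List.cons_append] at heq
        injection heq with hc _
        exact hb (by rw [← hc]; exact List.mem_cons_self)
  | cons c at' ih =>
    intro b r1 r2 ha hb h1 h2 heq
    cases b with
    | nil =>
      exfalso
      rcases h2 with rfl | ⟨t, rfl⟩
      · simp at heq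
      · simp only [List.nil_append, List.cons_append] at heq
        injection heq with hc _
        exact ha (by rw [hc]; exact List.mem_cons_self)
    | cons d bt =>
      simp at heq
      obtain ⟨rfl, heq2⟩ := heq
      have := ih bt r1 r2 (by simp at ha; exact ha.2) (by simp at hb; exact hb.2) h1 h2 heq2
      exact ⟨by rw [this.1], this.2⟩

theorem interc_single (a : List Char) : List.intercalate [',', ' '] [a] = a := by
  simp [List.intercalate]

theorem interc_cons2 (a b : List Char) (t : List (List Char)) :
    List.intercalate [',', ' '] (a :: b :: t)
      = a ++ ',' :: ' ' :: List.intercalate [',', ' '] (b :: t) := by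
  simp [List.intercalate, List.intersperse_cons₂]

theorem interc_ne_nil (x : List Char) (xt : List (List Char)) (hx : x ≠ []) :
    List.intercalate [',', ' '] (x :: xt) ≠ [] := by
  cases xt with
  | nil => rw [interc_single]; exact hx
  | cons y yt => rw [interc_cons2]; simp

theorem interc_inj : ∀ (xs ys : List (List Char)),
    (∀ x ∈ xs, x ≠ [] ∧ ',' ∉ x) → (∀ x ∈ ys, x ≠ [] ∧ ',' ∉ x) →
    List.intercalate [',', ' '] xs = List.intercalate [',', ' '] ys → xs = ys := by
  intro xs
  induction xs with
  | nil =>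
    intro ys hx hy h
    cases ys with
    | nil => rfl
    | cons y yt =>
      exfalso
      exact interc_ne_nil y yt (hy y (by simp)).1 (by rw [← h]; rfl)
  | cons x xt ih =>
    intro ys hx hy h
    cases ys with
    | nil =>
      exfalso
      exact interc_ne_nil x xt (hx x (by simp)).1 (by rw [h]; rfl)
    | cons y yt =>
      cases xt with
      | nil =>
        cases yt with
        | nil =>
          rw [interc_single, interc_single] at h
          rw [h]
        | cons y2 yt2 =>
          exfalso
          rw [interc_single, interc_cons2] at h
          have : ',' ∈ x := by rw [h]; simp
          exact (hx x (by simp)).2 this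
      | cons x2 xt2 =>
        cases yt with
        | nil =>
          exfalso
          rw [interc_single, interc_cons2] at h
          have : ',' ∈ y := by rw [← h]; simp
          exact (hy y (by simp)).2 this
        | cons y2 yt2 =>
          rw [interc_cons2, interc_cons2] at h
          have hp := pref_lemma x y (',' :: ' ' :: List.intercalate [',', ' '] (x2 :: xt2))
            (',' :: ' ' :: List.intercalate [',', ' '] (y2 :: yt2))
            (hx x (by simp)).2 (hy y (by simp)).2 (Or.inr ⟨_, rfl⟩) (Or.inr ⟨_, rfl⟩) h
          obtain ⟨rfl, htl⟩ := hp
          simp only [List.cons.injEq] at htl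
          have := ih (y2 :: yt2) (fun z hz => hx z (List.mem_cons_of_mem _ hz))
            (fun z hz => hy z (List.mem_cons_of_mem _ hz)) htl.2.2
          rw [this]

theorem pyStrList_toList (l : List Int) :
    ("[" ++ PySem.Str.join ", " (l.map PySem.Int.toStr) ++ "]").toList
      = '[' :: (List.intercalate [',', ' '] (l.map PySem.Int.toChars) ++ [']']) := by
  simp [PySem.Str.join, PySem.Chars.join, String.toList_append, List.map_map]
  congr 1
  simp [Function.comp_def, PySem.Int.toList_toStr]

theorem pyStrList_inj : ∀ {a b : List Int}, pyStrList a = pyStrList b → a = b := by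
  intro a b h
  have h2 : (pyStrList a).toList = (pyStrList b).toList := by rw [h]
  rw [show pyStrList a = "[" ++ PySem.Str.join ", " (a.map PySem.Int.toStr) ++ "]" from rfl,
     show pyStrList b = "[" ++ PySem.Str.join ", " (b.map PySem.Int.toStr) ++ "]" from rfl] at h2
  rw [pyStrList_toList, pyStrList_toList] at h2
  simp only [List.cons.injEq, true_and] at h2
  have h3 := List.append_cancel_right h2
  have tok : ∀ (l : List Int), ∀ x ∈ l.map PySem.Int.toChars, x ≠ [] ∧ ',' ∉ x := by
    intro l x hx
    obtain ⟨n, _, rfl⟩ := List.mem_map.1 hx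
    refine ⟨toChars_ne_nil, fun hc => ?_⟩
    have := toChars_digits ',' hc
    have h44 : (',' : Char).toNat = 44 := rfl
    omega
  have h4 := interc_inj _ _ (tok a) (tok b) h3
  exact List.map_injective_iff.2 (fun x y hxy => toChars_inj hxy) h4

-- ---------- 2. facts about redistribute ----------
theorem sum_set_eq (L : List Int) (n : Nat) (h : n < L.length) (a : Int) :
    (L.set n a).sum = L.sum - L.getD n 0 + a := by
  induction L generalizing n with
  | nil => simp at h
  | cons x t ih =>
    cases n with
    | zero => simp [List.sum_cons]; ring
    | succ n =>
      simp only [List.set, List.sum_cons, List.getD_cons_succ]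
      rw [ih n (by simpa using h)]
      ring

theorem mod_ne_of_offset (n : Int) (hn : 0 < n) (k0 : Int) (_hk0 : 0 ≤ k0) (hk0n : k0 < n)
    (x : Int) (hx1 : k0 + 1 ≤ x) (hx2 : x ≤ k0 + n - 1) : PySem.Int.mod x n ≠ k0 := by
  rw [PySem.Int.mod_eq_emod_of_pos hn]
  by_cases hxn : x < n
  · rw [Int.emod_eq_of_lt (by omega) hxn]; omega
  · rw [← Int.sub_emod_right x n, Int.emod_eq_of_lt (by omega) (by omega)]; omega

theorem getD_set_ne_int (l : List Int) (t m : Nat) (v : Int) (h : t ≠ m) :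
    (l.set t v).getD m 0 = l.getD m 0 := by
  by_cases hm : m < l.length
  · rw [List.getD_eq_getElem _ _ (by simpa using hm), List.getD_eq_getElem _ _ hm,
      List.getElem_set_ne h]
  · rw [List.getD_eq_default _ _ (by simpa using hm), List.getD_eq_default _ _ (by omega)]

theorem getD_set_self_int (l : List Int) (t : Nat) (h : t < l.length) (v : Int) :
    (l.set t v).getD t 0 = v := by
  rw [List.getD_eq_getElem _ _ (by simpa using h), List.getElem_set_self]

theorem fold1_lemma (n : Nat) (hn : 0 < n) (k0 : Nat) (hk0 : k0 < n) (lo : Int) :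
    ∀ (is : List Int) (nl : List Int), nl.length = n →
      (∀ x ∈ is, PySem.Int.mod x (n : Int) ≠ (k0 : Int)) →
      (is.foldl (fun nl i => PySem.List.pySetD nl (PySem.Int.mod i (nl.length : Int))
          (PySem.List.pyGetD nl (PySem.Int.mod i (nl.length : Int)) 0 + 1)) nl).length = n
      ∧ (is.foldl (fun nl i => PySem.List.pySetD nl (PySem.Int.mod i (nl.length : Int))
          (PySem.List.pyGetD nl (PySem.Int.mod i (nl.length : Int)) 0 + 1)) nl).sum
          = nl.sum + (is.length : Int)
      ∧ (is.foldl (fun nl i => PySem.List.pySetD nl (PySem.Int.mod i (nl.length : Int))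
          (PySem.List.pyGetD nl (PySem.Int.mod i (nl.length : Int)) 0 + 1)) nl).getD k0 0
          = nl.getD k0 0
      ∧ ((∀ x ∈ nl, lo ≤ x) → ∀ x ∈ (is.foldl (fun nl i =>
            PySem.List.pySetD nl (PySem.Int.mod i (nl.length : Int))
              (PySem.List.pyGetD nl (PySem.Int.mod i (nl.length : Int)) 0 + 1)) nl), lo ≤ x) := by
  intro is
  induction is with
  | nil => intro nl hlen _; exact ⟨hlen, by simp, rfl, fun h => h⟩
  | cons i is ih =>
    intro nl hlen his
    have hnpos : (0 : Int) < (n : Int) := by exact_mod_cast hn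
    have hmodnn : 0 ≤ PySem.Int.mod i (n : Int) := PySem.Int.mod_nonneg _ hnpos
    have hmodlt : PySem.Int.mod i (n : Int) < (n : Int) := PySem.Int.mod_lt _ hnpos
    have htlt : (PySem.Int.mod i (n : Int)).toNat < n := by omega
    have htne : (PySem.Int.mod i (n : Int)).toNat ≠ k0 := by
      intro hcon
      apply his i List.mem_cons_self
      rw [← hcon, Int.toNat_of_nonneg hmodnn]
    have hstep : PySem.List.pySetD nl (PySem.Int.mod i (nl.length : Int))
          (PySem.List.pyGetD nl (PySem.Int.mod i (nl.length : Int)) 0 + 1)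
        = nl.set (PySem.Int.mod i (n : Int)).toNat
            (nl.getD (PySem.Int.mod i (n : Int)).toNat 0 + 1) := by
      simp only [hlen]
      rw [PySem.List.pySetD_of_nonneg _ _ hmodnn, PySem.List.pyGetD_of_nonneg _ _ hmodnn]
    rw [List.foldl_cons, hstep]
    have hlen2 : (nl.set (PySem.Int.mod i (n : Int)).toNat
        (nl.getD (PySem.Int.mod i (n : Int)).toNat 0 + 1)).length = n := by
      rw [List.length_set]; exact hlen
    obtain ⟨ihl, ihs, ihg, ihlb⟩ := ih _ hlen2 (fun x hx => his x (List.mem_cons_of_mem _ hx))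
    refine ⟨ihl, ?_, ?_, ?_⟩
    · rw [ihs, sum_set_eq _ _ (by omega) _]
      simp [List.length_cons]
      ring
    · rw [ihg]
      exact getD_set_ne_int _ _ _ _ htne
    · intro hall x hx
      refine ihlb ?_ x hx
      intro y hy
      rcases List.mem_or_eq_of_mem_set hy with hy | hy
      · exact hall y hy
      · have : nl.getD (PySem.Int.mod i (n : Int)).toNat 0 ∈ nl := by
          rw [List.getD_eq_getElem _ _ (by omega)]
          exact List.getElem_mem _
        have := hall _ this
        omega

theorem fold2_lemma (n : Nat) (k0 : Nat) (hk0 : k0 < n) (d r : Int) :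
    ∀ (K : Nat), K ≤ n → ∀ (nl : List Int), nl.length = n →
      ((PySem.List.pyRange 0 (K : Int) 1).foldl (fun nl i =>
          if i ≠ (k0 : Int) then PySem.List.pySetD nl i (PySem.List.pyGetD nl i 0 + d)
          else PySem.List.pySetD nl i r) nl).length = n
      ∧ ∀ m : Nat, m < n →
        ((PySem.List.pyRange 0 (K : Int) 1).foldl (fun nl i =>
            if i ≠ (k0 : Int) then PySem.List.pySetD nl i (PySem.List.pyGetD nl i 0 + d)
            else PySem.List.pySetD nl i r) nl).getD m 0
          = if m < K then (if m = k0 then r else nl.getD m 0 + d) else nl.getD m 0 := by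
  intro K
  induction K with
  | zero =>
    intro _ nl hlen
    refine ⟨by simpa using hlen, ?_⟩
    intro m hm
    simp [PySem.List.pyRange_one]
  | succ K ih =>
    intro hK nl hlen
    obtain ⟨ihl, ihg⟩ := ih (by omega) nl hlen
    have hrange : PySem.List.pyRange 0 ((K + 1 : Nat) : Int) 1
        = PySem.List.pyRange 0 (K : Int) 1 ++ [(K : Int)] := by
      push_cast
      exact PySem.List.pyRange_one_succ_right (by positivity)
    rw [hrange, List.foldl_concat]
    set R := (PySem.List.pyRange 0 (K : Int) 1).foldl (fun nl i =>
        if i ≠ (k0 : Int) then PySem.List.pySetD nl i (PySem.List.pyGetD nl i 0 + d)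
        else PySem.List.pySetD nl i r) nl with hR
    by_cases hKk0 : K = k0
    · subst hKk0
      rw [if_neg (by simp), PySem.List.pySetD_natCast]
      refine ⟨by rw [List.length_set]; exact ihl, ?_⟩
      intro m hm
      by_cases hmK : m = K
      · subst hmK
        rw [getD_set_self_int _ _ (by omega) _]
        split_ifs <;> omega
      · rw [getD_set_ne_int _ _ _ _ (fun h => hmK h.symm), ihg m hm]
        split_ifs <;> omega
    · rw [if_pos (show (K : Int) ≠ (k0 : Int) by exact_mod_cast hKk0),
        PySem.List.pySetD_natCast, PySem.List.pyGetD_natCast]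
      refine ⟨by rw [List.length_set]; exact ihl, ?_⟩
      intro m hm
      by_cases hmK : m = K
      · subst hmK
        rw [getD_set_self_int _ _ (by omega) _, ihg _ hm]
        split_ifs <;> omega
      · rw [getD_set_ne_int _ _ _ _ (fun h => hmK h.symm), ihg m hm]
        split_ifs <;> omega

theorem redistribute_main (l : List Int) (hn : 2 ≤ l.length) :
    (redistribute l).length = l.length ∧
    (redistribute l).sum = l.sum ∧
    (∃ x ∈ redistribute l, 0 ≤ x) ∧
    (∀ lo : Int, lo ≤ 0 → (∀ x ∈ l, lo ≤ x) → (∃ x ∈ l, 0 ≤ x) →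
      ∀ x ∈ redistribute l, lo ≤ x) := by
  have hne : l ≠ [] := by intro h; subst h; simp at hn
  obtain ⟨p, hp⟩ : ∃ p, PySem.List.max? (PySem.List.enumerate l) (fun q => q.2) = some p := by
    cases hmx : PySem.List.max? (PySem.List.enumerate l) (fun q => q.2) with
    | none =>
      exfalso
      have h0 := (PySem.List.max?_eq_none_iff _ _).1 hmx
      have hlen := PySem.List.length_enumerate l 0
      rw [h0] at hlen
      simp at hlen
      exact hne (List.length_eq_zero_iff.1 hlen.symm)
    | some p => exact ⟨p, rfl⟩
  obtain ⟨k0, hk0, hpe⟩ := (PySem.List.mem_enumerate_iff _ _ _).1 (PySem.List.max?_mem hp)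
  rw [hpe] at hp
  have hmax : ∀ y ∈ l, y ≤ l[k0] := by
    intro y hy
    obtain ⟨m, hm, rfl⟩ := List.mem_iff_getElem.1 hy
    have hmem : ((0 : Int) + (m : Int), l[m]) ∈ PySem.List.enumerate l 0 :=
      (PySem.List.mem_enumerate_iff _ _ _).2 ⟨m, hm, rfl⟩
    exact PySem.List.max?_isMax hp _ hmem
  have hb : ((l.length : Int) - 1) ≠ 0 := by
    have : (2 : Int) ≤ (l.length : Int) := by exact_mod_cast hn
    omega
  have hbpos : (0 : Int) < (l.length : Int) - 1 := by
    have : (2 : Int) ≤ (l.length : Int) := by exact_mod_cast hn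
    omega
  have hk0i : (k0 : Int) < (l.length : Int) := by exact_mod_cast hk0
  unfold redistribute
  rw [hp]
  simp only [PySem.Int.divmod?, if_neg hb, zero_add]
  have hfd : l[k0].fdiv ((l.length : Int) - 1)
      = PySem.Int.floordiv (l[k0]) ((l.length : Int) - 1) := rfl
  have hfm : l[k0].fmod ((l.length : Int) - 1)
      = PySem.Int.mod (l[k0]) ((l.length : Int) - 1) := rfl
  by_cases hd : PySem.Int.floordiv (l[k0]) ((l.length : Int) - 1) = 0
  · rw [hfd, if_pos hd]
    have hmv := (PySem.Int.floordiv_eq_iff_of_pos hbpos).1 hd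
    simp only [zero_mul, one_mul, zero_add] at hmv
    have his : ∀ x ∈ PySem.List.pyRange ((k0 : Int) + 1) ((k0 : Int) + l[k0] + 1) 1,
        PySem.Int.mod x (l.length : Int) ≠ (k0 : Int) := by
      intro x hx
      rw [PySem.List.mem_pyRange_one] at hx
      exact mod_ne_of_offset _ (by omega) _ (by positivity) hk0i x hx.1 (by omega)
    have hlenrange : ((PySem.List.pyRange ((k0 : Int) + 1) ((k0 : Int) + l[k0] + 1) 1).length : Int)
        = l[k0] := by
      rw [PySem.List.length_pyRange_one]
      have h1 : ((k0 : Int) + l[k0] + 1) - ((k0 : Int) + 1) = l[k0] := by ring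
      rw [h1, Int.toNat_of_nonneg hmv.1]
    obtain ⟨f1l, f1s, f1g, _⟩ := fold1_lemma l.length (by omega) k0 hk0 0
      (PySem.List.pyRange ((k0 : Int) + 1) ((k0 : Int) + l[k0] + 1) 1) l rfl his
    rw [PySem.List.pySetD_natCast]
    refine ⟨by rw [List.length_set]; exact f1l, ?_, ?_, ?_⟩
    · rw [sum_set_eq _ _ (by omega) _, f1s, f1g, hlenrange,
        List.getD_eq_getElem _ _ hk0]
      ring
    · refine ⟨_, List.getElem_mem (by rw [List.length_set]; omega : k0 < _), ?_⟩
      rw [List.getElem_set_self]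
    · intro lo hlo hall hex
      obtain ⟨_, _, _, f1lb⟩ := fold1_lemma l.length (by omega) k0 hk0 lo
        (PySem.List.pyRange ((k0 : Int) + 1) ((k0 : Int) + l[k0] + 1) 1) l rfl his
      intro x hx
      rcases List.mem_or_eq_of_mem_set hx with hx | hx
      · exact f1lb hall x hx
      · omega
  · rw [hfd, if_neg hd, hfm]
    set d := PySem.Int.floordiv (l[k0]) ((l.length : Int) - 1) with hdd
    set r := PySem.Int.mod (l[k0]) ((l.length : Int) - 1) with hrr
    have hrnn : 0 ≤ r := PySem.Int.mod_nonneg _ hbpos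
    have hdr : d * ((l.length : Int) - 1) + r = l[k0] := PySem.Int.floordiv_mul_add_mod _ _
    obtain ⟨f2l, f2g⟩ := fold2_lemma l.length k0 hk0 d r l.length le_rfl l rfl
    set R := (PySem.List.pyRange 0 ((l.length : Nat) : Int) 1).foldl (fun nl i =>
        if i ≠ (k0 : Int) then PySem.List.pySetD nl i (PySem.List.pyGetD nl i 0 + d)
        else PySem.List.pySetD nl i r) l with hRdef
    have hRlen : R.length = l.length := f2l
    have hRexp : R = (l.map (fun x => x + d)).set k0 r := by
      apply List.ext_getElem
      · rw [hRlen, List.length_set, List.length_map]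
      · intro m h1 h2
        have hmn : m < l.length := by rw [hRlen] at h1; exact h1
        have hg := f2g m hmn
        rw [List.getD_eq_getElem _ _ h1] at hg
        rw [hg]
        by_cases hmk : m = k0
        · subst hmk
          rw [List.getElem_set_self]
          simp [hmn]
        · rw [List.getElem_set_ne (fun h => hmk h.symm), List.getElem_map]
          rw [List.getD_eq_getElem _ _ hmn]
          simp [hmn, hmk]
    have hmapsum : (l.map (fun x => x + d)).sum = l.sum + (l.length : Int) * d := by
      rw [PySem.List.sum_map_add_int l (fun x => x) (fun _ => d)]
      rw [List.map_id']
      rw [PySem.List.sum_map_const_int]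
    refine ⟨?_, ?_, ?_, ?_⟩
    · rw [hRexp, List.length_set, List.length_map]
    · rw [hRexp, sum_set_eq _ _ (by rw [List.length_map]; omega) _, hmapsum,
        List.getD_eq_getElem _ _ (by rw [List.length_map]; omega), List.getElem_map]
      linear_combination hdr
    · have hk0R : k0 < R.length := by rw [hRlen]; exact hk0
      refine ⟨R[k0], List.getElem_mem hk0R, ?_⟩
      rw [← List.getD_eq_getElem R 0 hk0R, f2g k0 hk0]
      simp [hk0]
      exact hrnn
    · intro lo hlo hall hex
      have hmvnn : 0 ≤ l[k0] := by
        obtain ⟨x, hxm, hx0⟩ := hex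
        exact le_trans hx0 (hmax x hxm)
      have hdnn : 0 ≤ d := by
        rw [hdd]
        rw [PySem.Int.le_floordiv_iff_mul_le hbpos]
        simpa using hmvnn
      intro x hx
      rw [hRexp] at hx
      rcases List.mem_or_eq_of_mem_set hx with hx | hx
      · obtain ⟨y, hy, rfl⟩ := List.mem_map.1 hx
        have := hall y hy
        omega
      · omega

-- ---------- 3. the orbit, its invariant, and the pigeonhole repeat ----------

def seqS (xs : List Int) (k : Nat) : List Int := redistribute^[k] xs

def strT (xs : List Int) (k : Nat) : String := pyStrList (seqS xs k)

def pvLo (xs : List Int) : Int := min 0 ((redistribute xs).foldr min 0)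

def pvHi (xs : List Int) : Int :=
  (redistribute xs).sum - ((xs.length : Int) - 1) * pvLo xs

def pvN (xs : List Int) : Nat := (pvHi xs + 1 - pvLo xs).toNat ^ xs.length

theorem pvFuel_eq (xs : List Int) : pvFuel xs = 2 * pvN xs + 4 := rfl

theorem seqS_succ (xs : List Int) (k : Nat) :
    seqS xs (k + 1) = redistribute (seqS xs k) := by
  simp [seqS, Function.iterate_succ_apply']

def InvP (xs : List Int) (l : List Int) : Prop :=
  l.length = xs.length ∧ l.sum = (redistribute xs).sum ∧
  (∀ x ∈ l, pvLo xs ≤ x) ∧ (∃ x ∈ l, 0 ≤ x)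

theorem pvLo_nonpos (xs : List Int) : pvLo xs ≤ 0 := min_le_left _ _

theorem foldr_min_le (l : List Int) : ∀ x ∈ l, l.foldr min 0 ≤ x := by
  induction l with
  | nil => simp
  | cons a t ih =>
    intro x hx
    rcases List.mem_cons.1 hx with rfl | hx
    · exact min_le_left _ _
    · exact le_trans (min_le_right _ _) (ih x hx)

theorem pvLo_le (xs : List Int) : ∀ x ∈ redistribute xs, pvLo xs ≤ x :=
  fun x hx => le_trans (min_le_right _ _) (foldr_min_le _ x hx)

theorem inv_seqS (xs : List Int) (hn : 2 ≤ xs.length) :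
    ∀ k, 1 ≤ k → InvP xs (seqS xs k) := by
  intro k hk
  induction k with
  | zero => omega
  | succ k ih =>
    rcases Nat.eq_zero_or_pos k with rfl | hk1
    · rw [show seqS xs 1 = redistribute xs from by simp [seqS]]
      obtain ⟨ml, _, mex, _⟩ := redistribute_main xs hn
      exact ⟨ml, rfl, pvLo_le xs, mex⟩
    · obtain ⟨hl, hs, hlb, hex⟩ := ih hk1
      rw [seqS_succ]
      have h2 : 2 ≤ (seqS xs k).length := by rw [hl]; exact hn
      obtain ⟨ml, ms, mex, mlb⟩ := redistribute_main (seqS xs k) h2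
      exact ⟨by rw [ml, hl], by rw [ms, hs], mlb (pvLo xs) (pvLo_nonpos xs) hlb hex, mex⟩

theorem sum_lb (t : List Int) (lo : Int) (h : ∀ x ∈ t, lo ≤ x) :
    (t.length : Int) * lo ≤ t.sum := by
  have := List.card_nsmul_le_sum t lo h
  simpa [nsmul_eq_mul] using this

theorem inv_ub (xs : List Int) (_hn : 2 ≤ xs.length) {l : List Int} (h : InvP xs l) :
    ∀ x ∈ l, x ≤ pvHi xs := by
  intro x hx
  obtain ⟨hl, hs, hlb, _⟩ := h
  obtain ⟨t1, t2, rfl⟩ := List.append_of_mem hx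
  have hs1 := sum_lb t1 (pvLo xs) (fun y hy => hlb y (by simp [hy]))
  have hs2 := sum_lb t2 (pvLo xs) (fun y hy => hlb y (by simp [hy]))
  have hsum : t1.sum + (x + t2.sum) = (redistribute xs).sum := by
    rw [← hs]; simp [List.sum_append]
  have hlen : (t1.length : Int) + (t2.length : Int) = (xs.length : Int) - 1 := by
    have h1 : t1.length + (t2.length + 1) = xs.length := by
      rw [← hl]; simp [List.length_append]
    have h2 : ((t1.length + (t2.length + 1) : Nat) : Int) = (xs.length : Int) := by
      exact_mod_cast congrArg (fun m : Nat => (m : Int)) h1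
    push_cast at h2
    omega
  have hsplit : ((xs.length : Int) - 1) * pvLo xs
      = (t1.length : Int) * pvLo xs + (t2.length : Int) * pvLo xs := by
    rw [← hlen]; ring
  rw [pvHi, hsplit]
  linarith

theorem exists_repeat (xs : List Int) (hn : 2 ≤ xs.length) :
    ∃ a b : Nat, 1 ≤ a ∧ a < b ∧ b ≤ pvN xs + 1 ∧ seqS xs a = seqS xs b := by
  classical
  have hmaps : ∀ k ∈ Finset.Icc 1 (pvN xs + 1),
      (fun (i : Fin xs.length) => (seqS xs k).getD i 0)
        ∈ Fintype.piFinset (fun _ : Fin xs.length => Finset.Icc (pvLo xs) (pvHi xs)) := by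
    intro k hk
    rw [Fintype.mem_piFinset]
    intro i
    rw [Finset.mem_Icc] at hk
    have hInv := inv_seqS xs hn k hk.1
    have hil : (i : Nat) < (seqS xs k).length := by rw [hInv.1]; exact i.isLt
    rw [List.getD_eq_getElem _ _ hil, Finset.mem_Icc]
    exact ⟨hInv.2.2.1 _ (List.getElem_mem hil), inv_ub xs hn hInv _ (List.getElem_mem hil)⟩
  have hcards : (Fintype.piFinset
        (fun _ : Fin xs.length => Finset.Icc (pvLo xs) (pvHi xs))).card
      < (Finset.Icc 1 (pvN xs + 1)).card := by
    rw [Fintype.card_piFinset]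
    simp only [Int.card_Icc, Nat.card_Icc, Finset.prod_const, Finset.card_univ,
      Fintype.card_fin]
    rw [show pvN xs + 1 + 1 - 1 = pvN xs + 1 by omega]
    exact Nat.lt_succ_self _
  obtain ⟨a, ha, b, hb, hne, heq⟩ :=
    Finset.exists_ne_map_eq_of_card_lt_of_maps_to hcards hmaps
  rw [Finset.mem_Icc] at ha hb
  have hsab : seqS xs a = seqS xs b := by
    have hIa := inv_seqS xs hn a ha.1
    have hIb := inv_seqS xs hn b hb.1
    apply List.ext_getElem (by rw [hIa.1, hIb.1])
    intro m h1 h2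
    have hm : m < xs.length := by rw [hIa.1] at h1; exact h1
    have hfun : (seqS xs a).getD m 0 = (seqS xs b).getD m 0 := congrFun heq ⟨m, hm⟩
    rw [List.getD_eq_getElem _ _ h1, List.getD_eq_getElem _ _ h2] at hfun
    exact hfun
  rcases Nat.lt_or_ge a b with h | h
  · exact ⟨a, b, ha.1, h, hb.2, hsab⟩
  · have hba : b < a := lt_of_le_of_ne h (Ne.symm hne)
    exact ⟨b, a, hb.1, hba, ha.2, hsab.symm⟩

-- ---------- 4. the two loops compute the cycle length ----------

def dictA (xs : List Int) (k : Nat) : PySem.Dict String Int :=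
  (List.range k).foldl (fun d m => d.insert (strT xs (m + 1)) ((m : Int) + 1)) PySem.Dict.empty

theorem dictA_succ (xs : List Int) (k : Nat) :
    dictA xs (k + 1) = (dictA xs k).insert (strT xs (k + 1)) ((k : Int) + 1) := by
  unfold dictA
  rw [List.range_succ, List.foldl_concat]

theorem dictA_get_none (xs : List Int) : ∀ (k : Nat) (x : String),
    (∀ m : Nat, m < k → strT xs (m + 1) ≠ x) → (dictA xs k).get? x = none := by
  intro k
  induction k with
  | zero =>
    intro x _
    exact PySem.Dict.get?_empty x
  | succ k ih =>
    intro x hne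
    rw [dictA_succ, PySem.Dict.get?_insert_of_ne _ _
      (fun hcon => hne k (by omega) hcon.symm)]
    exact ih x (fun m hm => hne m (by omega))

theorem dictA_get_found (xs : List Int) (j i : Nat) (h1i : 1 ≤ i) (hij : i < j)
    (hsij : seqS xs i = seqS xs j)
    (hF1 : ∀ a b : Nat, 1 ≤ a → a < b → b < j → seqS xs a ≠ seqS xs b) :
    ∀ k, i ≤ k → k < j → (dictA xs k).get? (strT xs j) = some ((i : Nat) : Int) := by
  intro k
  induction k with
  | zero => intro h0 _; omega
  | succ k ih =>
    intro hik hkj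
    rw [dictA_succ]
    by_cases hk : i = k + 1
    · have hkey : strT xs (k + 1) = strT xs j := by rw [strT, strT, ← hk, hsij]
      rw [hkey, PySem.Dict.get?_insert_self]
      subst hk
      push_cast
      ring_nf
    · have hne : strT xs j ≠ strT xs (k + 1) := by
        intro hcon
        have hseq := pyStrList_inj hcon
        exact hF1 i (k + 1) h1i (by omega) (by omega) (hsij.trans hseq)
      rw [PySem.Dict.get?_insert_of_ne _ _ hne]
      exact ih (by omega) (by omega)

theorem contains_false_of_not_mem {x : String} {cfg : List String} (h : x ∉ cfg) :
    PySem.Set.contains cfg x = false := by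
  rw [PySem.Set.contains, Bool.eq_false_iff]
  intro hc
  exact h (List.contains_iff_mem.1 hc)

theorem loopA_phase2 (xs : List Int) (j i : Nat) (_h1i : 1 ≤ i) (hij : i < j)
    (hper : seqS xs (j + (j - i)) = seqS xs j)
    (hph2 : ∀ q q' : Nat, q' < q → q + i < j → seqS xs (j + q) ≠ seqS xs (j + q')) :
    ∀ (c fuel q : Nat), q + c = j - i → 1 ≤ c → c ≤ fuel →
      partTwoLoopA fuel (seqS xs (j + q))
        ((List.range q).map (fun m => strT xs (j + m + 1))) (q : Int) (some (strT xs j))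
        = ((j - i : Nat) : Int) := by
  intro c
  induction c with
  | zero => intro fuel q _ hc _; omega
  | succ c ih =>
    intro fuel q hqc _ hfuel
    obtain ⟨fuel', rfl⟩ : ∃ f', fuel = f' + 1 := ⟨fuel - 1, by omega⟩
    simp only [partTwoLoopA]
    rw [show redistribute (seqS xs (j + q)) = seqS xs (j + q + 1) from (seqS_succ xs (j + q)).symm]
    by_cases hcz : c = 0
    · subst hcz
      have heq : seqS xs (j + q + 1) = seqS xs j := by
        rw [show j + q + 1 = j + (j - i) by omega, hper]
      rw [if_pos (by rw [show strT xs j = pyStrList (seqS xs j) from rfl, heq])]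
      have : q + 1 = j - i := by omega
      rw [← this]
      push_cast
      ring
    · have hne1 : seqS xs (j + q + 1) ≠ seqS xs j := by
        have h := hph2 (q + 1) 0 (by omega) (by omega)
        simpa using h
      rw [if_neg (by
        intro hcon
        rw [Option.some.injEq] at hcon
        exact hne1 (pyStrList_inj hcon))]
      have hnotmem : pyStrList (seqS xs (j + q + 1))
          ∉ (List.range q).map (fun m => strT xs (j + m + 1)) := by
        intro hmem
        obtain ⟨m, hm, hmeq⟩ := List.mem_map.1 hmem
        rw [List.mem_range] at hm
        have hseq := pyStrList_inj hmeq
        exact hph2 (q + 1) (m + 1) (by omega) (by omega)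
          (by rw [show j + (q + 1) = j + q + 1 from rfl,
            show j + (m + 1) = j + m + 1 from rfl, ← hseq])
      have hcontains := contains_false_of_not_mem hnotmem
      rw [if_neg (by rw [hcontains]; simp)]
      rw [show PySem.Set.add ((List.range q).map fun m => strT xs (j + m + 1))
            (pyStrList (seqS xs (j + q + 1)))
          = ((List.range q).map fun m => strT xs (j + m + 1))
            ++ [pyStrList (seqS xs (j + q + 1))] from by
        rw [PySem.Set.add, hcontains]; simp]
      rw [show ((List.range q).map fun m => strT xs (j + m + 1))
            ++ [pyStrList (seqS xs (j + q + 1))]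
          = (List.range (q + 1)).map (fun m => strT xs (j + m + 1)) from by
        rw [List.range_succ, List.map_append]; rfl]
      rw [show (q : Int) + 1 = ((q + 1 : Nat) : Int) by push_cast; ring]
      exact ih fuel' (q + 1) (by omega) (by omega) (by omega)

theorem loopA_phase1 (xs : List Int) (j i : Nat) (h1i : 1 ≤ i) (hij : i < j)
    (hsij : seqS xs i = seqS xs j)
    (hF1 : ∀ a b : Nat, 1 ≤ a → a < b → b < j → seqS xs a ≠ seqS xs b)
    (hper : seqS xs (j + (j - i)) = seqS xs j)
    (hph2 : ∀ q q' : Nat, q' < q → q + i < j → seqS xs (j + q) ≠ seqS xs (j + q')) :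
    ∀ (c fuel k : Nat), k + c = j → 1 ≤ c → c + (j - i) ≤ fuel →
      partTwoLoopA fuel (seqS xs k) ((List.range k).map (fun m => strT xs (m + 1)))
        (k : Int) none = ((j - i : Nat) : Int) := by
  intro c
  induction c with
  | zero => intro fuel k _ hc _; omega
  | succ c ih =>
    intro fuel k hkc _ hfuel
    obtain ⟨fuel', rfl⟩ : ∃ f', fuel = f' + 1 := ⟨fuel - 1, by omega⟩
    simp only [partTwoLoopA]
    rw [show redistribute (seqS xs k) = seqS xs (k + 1) from (seqS_succ xs k).symm]
    rw [if_neg (by simp)]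
    by_cases hcz : c = 0
    · have hkj : k + 1 = j := by omega
      have hmem : pyStrList (seqS xs (k + 1))
          ∈ (List.range k).map (fun m => strT xs (m + 1)) := by
        refine List.mem_map.2 ⟨i - 1, ?_, ?_⟩
        · rw [List.mem_range]; omega
        · rw [show i - 1 + 1 = i by omega, strT, hsij, ← hkj]
      rw [if_pos (by rw [PySem.Set.contains, List.contains_iff_mem]; exact hmem)]
      have hrec := loopA_phase2 xs j i h1i hij hper hph2 (j - i) fuel' 0 (by omega)
        (by omega) (by omega)
      rw [show seqS xs (j + 0) = seqS xs j from rfl] at hrec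
      simp only [List.range_zero, List.map_nil] at hrec
      rw [show pyStrList (seqS xs (k + 1)) = strT xs j from by rw [hkj]; rfl]
      rw [show ((0 : Nat) : Int) = (0 : Int) from rfl] at hrec
      rw [hkj]
      exact hrec
    · have hnotmem : pyStrList (seqS xs (k + 1))
          ∉ (List.range k).map (fun m => strT xs (m + 1)) := by
        intro hmem
        obtain ⟨m, hm, hmeq⟩ := List.mem_map.1 hmem
        rw [List.mem_range] at hm
        have hseq := pyStrList_inj hmeq
        exact hF1 (m + 1) (k + 1) (by omega) (by omega) (by omega) hseq
      have hcontains := contains_false_of_not_mem hnotmem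
      rw [if_neg (by rw [hcontains]; simp)]
      rw [show PySem.Set.add ((List.range k).map fun m => strT xs (m + 1))
            (pyStrList (seqS xs (k + 1)))
          = ((List.range k).map fun m => strT xs (m + 1))
            ++ [pyStrList (seqS xs (k + 1))] from by
        rw [PySem.Set.add, hcontains]; simp]
      rw [show ((List.range k).map fun m => strT xs (m + 1))
            ++ [pyStrList (seqS xs (k + 1))]
          = (List.range (k + 1)).map (fun m => strT xs (m + 1)) from by
        rw [List.range_succ, List.map_append]; rfl]
      rw [show (k : Int) + 1 = ((k + 1 : Nat) : Int) by push_cast; ring]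
      exact ih fuel' (k + 1) (by omega) (by omega) (by omega)

theorem loopB_run (xs : List Int) (j i : Nat) (h1i : 1 ≤ i) (hij : i < j)
    (hsij : seqS xs i = seqS xs j)
    (hF1 : ∀ a b : Nat, 1 ≤ a → a < b → b < j → seqS xs a ≠ seqS xs b) :
    ∀ (c fuel k : Nat), k + c = j → 1 ≤ k → 1 ≤ c → c ≤ fuel →
      partTwoLoopB fuel (seqS xs k) (dictA xs k) (k : Int) = (j : Int) - (i : Int) := by
  intro c
  induction c with
  | zero => intro fuel k _ _ hc _; omega
  | succ c ih =>
    intro fuel k hkc hk1 _ hfuel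
    obtain ⟨fuel', rfl⟩ : ∃ f', fuel = f' + 1 := ⟨fuel - 1, by omega⟩
    simp only [partTwoLoopB]
    rw [show redistribute (seqS xs k) = seqS xs (k + 1) from (seqS_succ xs k).symm]
    by_cases hcz : c = 0
    · have hkj : k + 1 = j := by omega
      have hget : (dictA xs k).get? (pyStrList (seqS xs (k + 1))) = some ((i : Nat) : Int) := by
        rw [show pyStrList (seqS xs (k + 1)) = strT xs j from by rw [hkj]; rfl]
        exact dictA_get_found xs j i h1i hij hsij hF1 k (by omega) (by omega)
      rw [hget]
      show (k : Int) + 1 - ((i : Nat) : Int) = (j : Int) - (i : Int)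
      have : ((k + 1 : Nat) : Int) = (j : Int) := by exact_mod_cast hkj
      push_cast at this ⊢
      omega
    · have hnone : (dictA xs k).get? (pyStrList (seqS xs (k + 1))) = none := by
        apply dictA_get_none
        intro m hm hcon
        have hseq := pyStrList_inj hcon
        exact hF1 (m + 1) (k + 1) (by omega) (by omega) (by omega) hseq
      rw [hnone]
      show partTwoLoopB fuel' (seqS xs (k + 1))
        ((dictA xs k).insert (pyStrList (seqS xs (k + 1))) ((k : Int) + 1)) ((k : Int) + 1)
        = (j : Int) - (i : Int)
      rw [show (dictA xs k).insert (pyStrList (seqS xs (k + 1))) ((k : Int) + 1)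
          = dictA xs (k + 1) from by rw [dictA_succ]; rfl]
      rw [show (k : Int) + 1 = ((k + 1 : Nat) : Int) by push_cast; ring]
      exact ih fuel' (k + 1) (by omega) (by omega) (by omega) (by omega)

-- ---------- 5. assembly ----------

theorem main_equiv (xs : List Int) (hn : 2 ≤ xs.length) : part_two xs = part_two_alt xs := by
  classical
  obtain ⟨a, b, ha1, hab, hbN, hsab⟩ := exists_repeat xs hn
  set P : Nat → Prop := fun m => ∃ i0, i0 < m ∧ (1 ≤ i0 ∧ seqS xs i0 = seqS xs m) with hP
  haveI hdec : DecidablePred P := fun m => by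
    rw [hP]
    exact decidable_of_iff (∃ i0 ∈ Finset.range m, 1 ≤ i0 ∧ seqS xs i0 = seqS xs m) (by
      constructor
      · rintro ⟨i0, hi0, h⟩; exact ⟨i0, Finset.mem_range.1 hi0, h⟩
      · rintro ⟨i0, hi0, h⟩; exact ⟨i0, Finset.mem_range.2 hi0, h⟩)
  have hPex : ∃ m, P m := ⟨b, a, hab, ha1, hsab⟩
  set j := Nat.find hPex with hjdef
  obtain ⟨i0, hi0j, hi01, hsi0⟩ := Nat.find_spec hPex
  have hjb : j ≤ b := Nat.find_min' hPex ⟨a, hab, ha1, hsab⟩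
  have hQex : ∃ m, 1 ≤ m ∧ m < j ∧ seqS xs m = seqS xs j := ⟨i0, hi01, hi0j, hsi0⟩
  set i := Nat.find hQex with hidef
  obtain ⟨h1i, hij, hsij⟩ := Nat.find_spec hQex
  have hF1 : ∀ a' b' : Nat, 1 ≤ a' → a' < b' → b' < j → seqS xs a' ≠ seqS xs b' := by
    intro a' b' ha' hab' hb' hcon
    exact Nat.find_min hPex hb' ⟨a', hab', ha', hcon⟩
  have hperiodic : ∀ m, i ≤ m → seqS xs (m + (j - i)) = seqS xs m := by
    intro m hm
    induction m, hm using Nat.le_induction with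
    | base => rw [show i + (j - i) = j by omega]; exact hsij.symm
    | succ m hm ihm =>
      rw [show m + 1 + (j - i) = (m + (j - i)) + 1 by omega, seqS_succ, ihm, ← seqS_succ]
  have hper : seqS xs (j + (j - i)) = seqS xs j := hperiodic j (by omega)
  have hph2 : ∀ q q' : Nat, q' < q → q + i < j → seqS xs (j + q) ≠ seqS xs (j + q') := by
    intro q q' hq' hqi
    have hq1 : seqS xs (j + q) = seqS xs (i + q) := by
      have := hperiodic (i + q) (by omega)
      rw [show i + q + (j - i) = j + q by omega] at this
      exact this
    have hq2 : seqS xs (j + q') = seqS xs (i + q') := by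
      have := hperiodic (i + q') (by omega)
      rw [show i + q' + (j - i) = j + q' by omega] at this
      exact this
    rw [hq1, hq2]
    intro hcon
    exact hF1 (i + q') (i + q) (by omega) (by omega) (by omega) hcon.symm
  have hj2 : 2 ≤ j := by omega
  have hjN : j ≤ pvN xs + 1 := le_trans hjb hbN
  -- run A
  have hA : part_two xs = ((j - i : Nat) : Int) := by
    have h := loopA_phase1 xs j i h1i hij hsij hF1 hper hph2 j (pvFuel xs) 0
      (by omega) (by omega) (by rw [pvFuel_eq]; omega)
    simp only [List.range_zero, List.map_nil] at h
    rw [show ((0 : Nat) : Int) = (0 : Int) from rfl] at h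
    exact h
  -- run B
  have hB : part_two_alt xs = (j : Int) - (i : Int) := by
    have h := loopB_run xs j i h1i hij hsij hF1 (j - 1) (pvFuel xs) 1
      (by omega) (by omega) (by omega) (by rw [pvFuel_eq]; omega)
    have hseq1 : seqS xs 1 = redistribute xs := by simp [seqS]
    have hd1 : dictA xs 1 = PySem.Dict.empty.insert (pyStrList (redistribute xs)) 1 := by
      unfold dictA
      rw [show List.range 1 = [0] from rfl, List.foldl_cons, List.foldl_nil]
      rw [show strT xs (0 + 1) = pyStrList (redistribute xs) from by rw [strT, hseq1]]
      norm_num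
    rw [hd1, hseq1] at h
    norm_num at h
    exact h
  rw [hA, hB]
  omega

-- ===== VERDICT (by name: the statement is the Claim_ definition above) =====
theorem part_two_spec : Claim_equal_part_two := by
  intro xs _ hpre
  unfold Spec_part_two
  exact main_equiv xs hpre
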